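-- pv_equiv track=rewrite | github.com/betagouv/depenses-eclairees | app/processor/post_processing_llm.py | check_consistency_bank_account
-- ===== SOURCE A (Python) =====
-- def check_consistency_bank_account(bank_account_input: str) -> bool:
--     """
--     Vérifie la validité d'un IBAN selon la norme ISO 13616.
--     Retourne True si valide, False sinon.
--     """
--     # Longueur minimale (2 lettres pays + 2 chiffres contrôle + BBAN)
--     if len(bank_account_input) < 5:
--         return False
--
--     # 2. Déplacer les 4 premiers caractères à la fin
--     rearranged = bank_account_input[4:] + bank_account_input[:4]
--
--     # 3. Remplacer chaque lettre par sa valeur numérique A=10, B=11, ...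
--     converted = ""
--     for char in rearranged:
--         if char.isdigit():
--             converted += char
--         elif char.isalpha():
--             # A -> 10, ..., Z -> 35
--             converted += str(ord(char) - 55)
--         else:
--             return False  # caractère invalide
--
--     # 4. Calcul mod 97 sur un nombre potentiellement très grand
--     # On calcule le modulo progressivement (méthode standard IBAN)
--     remainder = 0
--     for digit in converted:
--         remainder = (remainder * 10 + int(digit)) % 97
--
--     # 5. Un IBAN est valide si le résultat = 1
--     return remainder == 1
-- ===== SOURCE B (Python) =====
-- def check_consistency_bank_account(bank_account_input: str) -> bool:
--     """IBAN mod-97 check: scan the rearranged string right-to-left once,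
--     keeping the current power of 10 modulo 97 and a weighted running
--     remainder -- no converted digit string, no progressive Horner loop."""
--     if len(bank_account_input) < 5:
--         return False
--     r = 0
--     p = 1
--     for ch in reversed(bank_account_input[4:] + bank_account_input[:4]):
--         if ch.isdigit():
--             r = (r + (ord(ch) - 48) * p) % 97
--             p = p * 10 % 97
--         elif ch.isalpha():
--             # an (ASCII) letter stands for the two-digit number ord(ch) - 55
--             r = (r + (ord(ch) - 55) * p) % 97
--             p = p * 100 % 97
--         else:
--             return False
--     return r == 1
-- ===== Notes on version B (the rewrite author's own statement) =====
-- stated objective: faster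
-- what changed: B never builds the converted digit string and never runs A's left-to-right progressive Horner modulo: it scans the rearranged string right-to-left in a single loop, maintaining the current power of 10 mod 97 and adding each character's weighted value to a running remainder, avoiding per-character string concatenation and str()/int() conversions.
import Mathlib
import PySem

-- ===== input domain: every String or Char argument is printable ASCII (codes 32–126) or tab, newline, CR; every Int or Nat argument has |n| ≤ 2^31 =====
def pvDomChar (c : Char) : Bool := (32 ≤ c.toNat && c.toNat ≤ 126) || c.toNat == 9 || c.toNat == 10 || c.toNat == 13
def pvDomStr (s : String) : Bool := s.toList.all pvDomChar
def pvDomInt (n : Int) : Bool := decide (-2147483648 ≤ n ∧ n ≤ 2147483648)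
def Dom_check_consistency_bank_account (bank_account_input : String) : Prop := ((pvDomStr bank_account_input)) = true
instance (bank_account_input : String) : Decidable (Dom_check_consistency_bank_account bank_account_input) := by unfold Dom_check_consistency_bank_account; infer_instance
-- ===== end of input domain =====

-- B drops A's converted-string building and left-to-right progressive Horner modulo: one
-- right-to-left scan keeping the current power of 10 mod 97 (objective: faster; measured).

-- ===== PORT A =====
-- the conversion loop: build the digit string, none = the early 'return False' on an invalid char
def pvConvLoopA : List Char → List Char → Option (List Char)
  | [], conv => some conv
  | c :: cs, conv =>
    if PySem.Chars.isdigit c then pvConvLoopA cs (conv ++ [c])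
    else if PySem.Chars.isalpha c then
      pvConvLoopA cs (conv ++ PySem.Int.toChars ((c.toNat : Int) - 55))
    else none

def check_consistency_bank_account (bank_account_input : String) : Bool :=
  if PySem.Str.len bank_account_input < 5 then false
  else
    -- rearranged = bank_account_input[4:] + bank_account_input[:4]
    match pvConvLoopA (PySem.List.slice bank_account_input.toList (some 4) none ++
                       PySem.List.slice bank_account_input.toList none (some 4)) [] with
    | none => false
    | some conv =>
      -- int(digit): conv holds only ASCII digit chars, so int(digit) = ord(digit) - 48 exactly
      (conv.foldl (fun r c => PySem.Int.mod (r * 10 + ((c.toNat : Int) - 48)) 97) 0) == 1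

-- ===== PORT B =====
-- one right-to-left pass: r = weighted remainder so far, p = current power of 10 mod 97;
-- none = the early 'return False' on an invalid char
def pvRevLoopB : List Char → Int → Int → Option Int
  | [], r, _ => some r
  | c :: cs, r, p =>
    if PySem.Chars.isdigit c then
      pvRevLoopB cs (PySem.Int.mod (r + ((c.toNat : Int) - 48) * p) 97) (PySem.Int.mod (p * 10) 97)
    else if PySem.Chars.isalpha c then
      pvRevLoopB cs (PySem.Int.mod (r + ((c.toNat : Int) - 55) * p) 97) (PySem.Int.mod (p * 100) 97)
    else none

def check_consistency_bank_account_alt (bank_account_input : String) : Bool :=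
  if PySem.Str.len bank_account_input < 5 then false
  else
    -- reversed(bank_account_input[4:] + bank_account_input[:4])
    match pvRevLoopB (PySem.List.slice bank_account_input.toList (some 4) none ++
                      PySem.List.slice bank_account_input.toList none (some 4)).reverse 0 1 with
    | none => false
    | some r => r == 1

-- ===== PRECONDITION & SPEC =====
def Spec_check_consistency_bank_account (bank_account_input : String) (out : Bool) : Prop := out = check_consistency_bank_account_alt bank_account_input
instance (bank_account_input : String) (out : Bool) : Decidable (Spec_check_consistency_bank_account bank_account_input out) := by unfold Spec_check_consistency_bank_account; infer_instance

-- ===== CLAIM (what is proved, stated in full; the proofs are below) =====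
def Claim_equal_check_consistency_bank_account : Prop := ∀ (bank_account_input : String), Dom_check_consistency_bank_account bank_account_input → Spec_check_consistency_bank_account bank_account_input (check_consistency_bank_account bank_account_input)

-- ===== LEMMAS AND PROOFS =====

-- proof-side bridge: the big integer both programs implicitly evaluate mod 97
-- (value of the converted digit string; none on the first invalid char)
def pvBigVal : List Char → Int → Option Int
  | [], n => some n
  | c :: cs, n =>
    if PySem.Chars.isdigit c then pvBigVal cs (n * 10 + ((c.toNat : Int) - 48))
    else if PySem.Chars.isalpha c then pvBigVal cs (n * 100 + ((c.toNat : Int) - 55))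
    else none

-- the decimal value of a list of digit chars, Horner-style, starting from a
def pvNu (ds : List Char) (a : Int) : Int :=
  ds.foldl (fun x c => x * 10 + ((c.toNat : Int) - 48)) a

theorem pvNu_append (l₁ l₂ : List Char) (a : Int) : pvNu (l₁ ++ l₂) a = pvNu l₂ (pvNu l₁ a) := by
  simp [pvNu, List.foldl_append]

theorem pvNu_two (l : List Char) (h : l.length = 2) (a : Int) : pvNu l a = a * 100 + pvNu l 0 := by
  match l, h with
  | [c₁, c₂], _ => simp [pvNu]; ring

-- str(v) for 10 ≤ v ≤ 67 is two digit chars whose value is v (closed check over the range)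
theorem pvToChars_range :
    ∀ m ∈ List.range' 10 58,
      (PySem.Int.toChars (m : Int)).length = 2 ∧ pvNu (PySem.Int.toChars (m : Int)) 0 = (m : Int) := by
  decide

theorem pvLetter_val (c : Char) (h : PySem.Chars.isalpha c = true) :
    (PySem.Int.toChars ((c.toNat : Int) - 55)).length = 2 ∧
    pvNu (PySem.Int.toChars ((c.toNat : Int) - 55)) 0 = (c.toNat : Int) - 55 := by
  have hr : 65 ≤ c.toNat ∧ c.toNat ≤ 90 ∨ 97 ≤ c.toNat ∧ c.toNat ≤ 122 := by
    simp only [PySem.Chars.isalpha, PySem.Chars.isupper, PySem.Chars.islower,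
      Bool.or_eq_true, Bool.and_eq_true, decide_eq_true_eq, Char.le_def] at h
    rcases h with ⟨h1, h2⟩ | ⟨h1, h2⟩ <;> [left; right] <;>
      exact ⟨UInt32.le_iff_toNat_le.mp h1, UInt32.le_iff_toNat_le.mp h2⟩
  have hm : c.toNat - 55 ∈ List.range' 10 58 := by
    rw [List.mem_range'_1]
    omega
  have := pvToChars_range (c.toNat - 55) hm
  have hcast : ((c.toNat - 55 : Nat) : Int) = (c.toNat : Int) - 55 := by omega
  rw [hcast] at this
  exact this

-- A's conversion loop and the big-value bridge agree
theorem pvLoops_agree (cs : List Char) (conv : List Char) :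
    Option.map (fun ds => pvNu ds 0) (pvConvLoopA cs conv) = pvBigVal cs (pvNu conv 0) := by
  induction cs generalizing conv with
  | nil => rfl
  | cons c cs ih =>
    by_cases hd : PySem.Chars.isdigit c = true
    · rw [pvConvLoopA, pvBigVal, if_pos hd, if_pos hd, ih]
      rw [pvNu_append]
      rfl
    · by_cases ha : PySem.Chars.isalpha c = true
      · rw [pvConvLoopA, pvBigVal, if_neg hd, if_neg hd, if_pos ha, if_pos ha, ih]
        obtain ⟨hl, hv⟩ := pvLetter_val c ha
        rw [pvNu_append, pvNu_two _ hl, hv]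
      · rw [pvConvLoopA, pvBigVal, if_neg hd, if_neg hd, if_neg ha, if_neg ha]
        rfl

-- A's progressive modulo is the modulo of the accumulated number
theorem pvHorner_mod (ds : List Char) (r : Int) :
    ds.foldl (fun x c => PySem.Int.mod (x * 10 + ((c.toNat : Int) - 48)) 97) (PySem.Int.mod r 97)
      = PySem.Int.mod (pvNu ds r) 97 := by
  induction ds generalizing r with
  | nil => simp [pvNu]
  | cons c ds ih =>
    have h97 : (0 : Int) < 97 := by norm_num
    have key : PySem.Int.mod (PySem.Int.mod r 97 * 10 + ((c.toNat : Int) - 48)) 97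
        = PySem.Int.mod (r * 10 + ((c.toNat : Int) - 48)) 97 := by
      rw [PySem.Int.mod_eq_emod_of_pos h97, PySem.Int.mod_eq_emod_of_pos h97,
          PySem.Int.mod_eq_emod_of_pos h97]
      omega
    simp only [List.foldl_cons]
    rw [key]
    simpa [pvNu] using ih (r * 10 + ((c.toNat : Int) - 48))

theorem pvMod_step (r v p : Int) : (r % 97 + v * (p % 97)) % 97 = (r + v * p) % 97 := by
  conv_lhs => rw [Int.add_emod, Int.mul_emod]
  conv_rhs => rw [Int.add_emod, Int.mul_emod]
  simp [Int.emod_emod_of_dvd]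

theorem pvMod_pow (p w : Int) : (p % 97 * w) % 97 = (p * w) % 97 := by
  conv_lhs => rw [Int.mul_emod]
  conv_rhs => rw [Int.mul_emod]
  simp [Int.emod_emod_of_dvd]

theorem pvBigVal_append (l₁ l₂ : List Char) (n : Int) :
    pvBigVal (l₁ ++ l₂) n
      = match pvBigVal l₁ n with
        | none => none
        | some m => pvBigVal l₂ m := by
  induction l₁ generalizing n with
  | nil => simp [pvBigVal]
  | cons d t iht =>
    rw [List.cons_append, pvBigVal, pvBigVal]
    split_ifs <;> first | exact iht _ | rfl

-- B's right-to-left weighted scan computes the big value mod 97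
theorem pvRev_big (cs : List Char) : ∀ r p : Int,
    pvRevLoopB cs.reverse (r % 97) (p % 97)
      = Option.map (fun n => (r + n * p) % 97) (pvBigVal cs 0) := by
  have h97 : (0 : Int) < 97 := by norm_num
  induction cs using List.reverseRecOn with
  | nil => intro r p; simp [pvRevLoopB, pvBigVal]
  | append_singleton t c ih =>
    intro r p
    rw [List.reverse_append, List.reverse_singleton, List.singleton_append]
    have hsplit : ∀ n : Int, pvBigVal (t ++ [c]) n
        = match pvBigVal t n with
          | none => none
          | some m => pvBigVal [c] m := fun n => pvBigVal_append t [c] n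
    by_cases hd : PySem.Chars.isdigit c = true
    · rw [pvRevLoopB, if_pos hd,
        PySem.Int.mod_eq_emod_of_pos h97, PySem.Int.mod_eq_emod_of_pos h97,
        pvMod_step, pvMod_pow, ih (r + ((c.toNat : Int) - 48) * p) (p * 10), hsplit]
      cases pvBigVal t 0 with
      | none => rfl
      | some m =>
        simp only [pvBigVal, if_pos hd, Option.map_some]
        congr 2
        ring
    · by_cases ha : PySem.Chars.isalpha c = true
      · rw [pvRevLoopB, if_neg hd, if_pos ha,
          PySem.Int.mod_eq_emod_of_pos h97, PySem.Int.mod_eq_emod_of_pos h97,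
          pvMod_step, pvMod_pow, ih (r + ((c.toNat : Int) - 55) * p) (p * 100), hsplit]
        cases pvBigVal t 0 with
        | none => rfl
        | some m =>
          simp only [pvBigVal, if_neg hd, if_pos ha, Option.map_some]
          congr 2
          ring
      · rw [pvRevLoopB, if_neg hd, if_neg ha, hsplit]
        cases pvBigVal t 0 with
        | none => rfl
        | some m => simp [pvBigVal, if_neg hd, if_neg ha]

-- ===== VERDICT (by name: the statement is the Claim_ definition above) =====
theorem check_consistency_bank_account_spec : Claim_equal_check_consistency_bank_account := by
  intro s _
  unfold Spec_check_consistency_bank_account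
  unfold check_consistency_bank_account check_consistency_bank_account_alt
  by_cases hlen : PySem.Str.len s < 5
  · rw [if_pos hlen, if_pos hlen]
  · rw [if_neg hlen, if_neg hlen]
    have hA := pvLoops_agree (PySem.List.slice s.toList (some 4) none ++
        PySem.List.slice s.toList none (some 4)) []
    have h0 : pvNu ([] : List Char) 0 = 0 := rfl
    rw [h0] at hA
    have hB := pvRev_big (PySem.List.slice s.toList (some 4) none ++
        PySem.List.slice s.toList none (some 4)) 0 1
    rw [show (0 : Int) % 97 = 0 from rfl, show (1 : Int) % 97 = 1 from rfl] at hB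
    cases hV : pvBigVal (PySem.List.slice s.toList (some 4) none ++
        PySem.List.slice s.toList none (some 4)) 0 with
    | none =>
      rw [hV] at hA hB
      rw [Option.map_eq_none_iff] at hA
      rw [Option.map_none] at hB
      rw [hA, hB]
    | some n =>
      rw [hV] at hA hB
      rw [Option.map_eq_some_iff] at hA
      obtain ⟨conv, hconv, hnu⟩ := hA
      rw [Option.map_some] at hB
      rw [hconv, hB]
      show (List.foldl (fun x c => PySem.Int.mod (x * 10 + ((c.toNat : Int) - 48)) 97) 0 conv == 1)
        = (((0 + n * 1) % 97 : Int) == 1)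
      have hh := pvHorner_mod conv 0
      rw [show PySem.Int.mod 0 97 = (0 : Int) from rfl] at hh
      rw [hh, hnu, PySem.Int.mod_eq_emod_of_pos (by norm_num)]
      norm_num
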